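-- pv_equiv track=rewrite | github.com/Vkuzmeniuk/TuxedoVPN | tuxedo/src/tuxedo/config.py | _is_safe_identifier
-- ===== SOURCE A (Python) =====
-- def _is_safe_identifier(value: str) -> bool:
--     # Allow schema-qualified identifiers, e.g. "public.radcheck".
--     parts = (value or "").split(".")
--     if not parts:
--         return False
--     for part in parts:
--         if not part:
--             return False
--         if not (part[0].isalpha() or part[0] == "_"):
--             return False
--         for ch in part[1:]:
--             if not (ch.isalnum() or ch == "_"):
--                 return False
--     return True
-- ===== SOURCE B (Python) =====
-- def _is_safe_identifier(value: str) -> bool: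
--     # One-pass scan: `start` is True exactly when the next char must begin a part.
--     start = True
--     for ch in (value or ""):
--         if ch == ".":
--             if start:
--                 return False
--             start = True
--         elif start:
--             if not (ch.isalpha() or ch == "_"):
--                 return False
--             start = False
--         else:
--             if not (ch.isalnum() or ch == "_"):
--                 return False
--     return not start
-- ===== Notes on version B (the rewrite author's own statement) =====
-- stated objective: simpler
-- what changed: Replaces split-on-dot plus nested per-part/per-char validation loops with a single left-to-right scan maintaining one boolean state flag (expecting the first char of a part); no intermediate list of parts is built.
import Mathlib
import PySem

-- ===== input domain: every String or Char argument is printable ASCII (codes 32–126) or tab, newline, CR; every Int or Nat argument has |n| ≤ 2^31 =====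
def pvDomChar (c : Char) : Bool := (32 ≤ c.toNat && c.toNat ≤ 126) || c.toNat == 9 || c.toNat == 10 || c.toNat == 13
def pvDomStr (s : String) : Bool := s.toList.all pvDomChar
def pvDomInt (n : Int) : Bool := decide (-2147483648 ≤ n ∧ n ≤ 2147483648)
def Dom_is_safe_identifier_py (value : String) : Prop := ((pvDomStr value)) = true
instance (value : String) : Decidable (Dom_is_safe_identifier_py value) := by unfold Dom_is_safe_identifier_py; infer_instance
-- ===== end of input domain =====

-- B is a single-pass scan with a 'start' flag instead of A's split('.') plus nested validation loops (same cost, simpler).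

-- ===== PORT A =====
-- per-part check: 'if not part: …; if not (part[0].isalpha() or part[0] == "_"): …; for ch in part[1:]: …'
def aCheckPart (part : List Char) : Bool :=
  match part with
  | [] => false
  | p0 :: rest =>
    if !(PySem.Chars.isalpha p0 || p0 == '_') then false
    else rest.all (fun ch => PySem.Chars.isalnum ch || ch == '_')

-- '(value or "")' equals value for every str argument (the empty string is its own fallback), so we split value itself.
def is_safe_identifier_py (value : String) : Bool :=
  let parts := PySem.Chars.splitOn value.toList ['.']
  if parts = [] then false
  else parts.all aCheckPart

-- ===== PORT B =====
-- one pass; 'start' is true exactly when the next char must begin a part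
def bLoop : List Char → Bool → Bool
  | [], start => !start
  | c :: rest, start =>
    if c == '.' then (if start then false else bLoop rest true)
    else if start then
      (if PySem.Chars.isalpha c || c == '_' then bLoop rest false else false)
    else
      (if PySem.Chars.isalnum c || c == '_' then bLoop rest false else false)

def is_safe_identifier_py_alt (value : String) : Bool :=
  bLoop value.toList true

-- ===== PRECONDITION & SPEC =====
def Spec_is_safe_identifier_py (value : String) (out : Bool) : Prop := out = is_safe_identifier_py_alt value
instance (value : String) (out : Bool) : Decidable (Spec_is_safe_identifier_py value out) := by unfold Spec_is_safe_identifier_py; infer_instance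

-- ===== CLAIM (what is proved, stated in full; the proofs are below) =====
def Claim_equal_is_safe_identifier_py : Prop := ∀ (value : String), Dom_is_safe_identifier_py value → Spec_is_safe_identifier_py value (is_safe_identifier_py value)

-- ===== LEMMAS AND PROOFS =====

-- a simple structural model of split('.') on a char list
def splitDot : List Char → List (List Char)
  | [] => [[]]
  | c :: rest =>
    if c = '.' then [] :: splitDot rest
    else
      match splitDot rest with
      | [] => [[c]]   -- unreachable: splitDot is never empty
      | p :: ps => (c :: p) :: ps

theorem splitDot_ne_nil (cs : List Char) : splitDot cs ≠ [] := by
  cases cs with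
  | nil => simp [splitDot]
  | cons c rest =>
    simp only [splitDot]
    split
    · simp
    · split <;> simp

-- prepend a prefix onto the first piece
def consHead (pre : List Char) : List (List Char) → List (List Char)
  | [] => [pre]
  | p :: ps => (pre ++ p) :: ps

theorem go_eq_splitDot (fuel : Nat) (l cur : List Char) (acc : List (List Char))
    (h : l.length < fuel) :
    PySem.Chars.splitOn.go ['.'] fuel l cur acc =
      acc.reverse ++ consHead cur.reverse (splitDot l) := by
  induction fuel generalizing l cur acc with
  | zero => omega
  | succ fuel ih =>
    cases l with
    | nil => simp [PySem.Chars.splitOn.go, splitDot, consHead]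
    | cons c rest =>
      by_cases hc : c = '.'
      · subst hc
        have : List.isPrefixOf ['.'] ('.' :: rest) = true := by
          simp [List.isPrefixOf]
        simp only [PySem.Chars.splitOn.go, this, if_pos, splitDot]
        rw [ih _ _ _ (by simpa using Nat.lt_of_succ_lt_succ h)]
        simp
        cases hs : splitDot rest with
        | nil => exact absurd hs (splitDot_ne_nil rest)
        | cons p ps => simp [consHead]
      · have : List.isPrefixOf ['.'] (c :: rest) = false := by
          simp [List.isPrefixOf]
          intro h'; exact hc h'.symm
        simp only [PySem.Chars.splitOn.go, this, Bool.false_eq_true, if_false]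
        rw [ih _ _ _ (by simpa using Nat.lt_of_succ_lt_succ h)]
        simp only [splitDot, if_neg hc]
        cases hs : splitDot rest with
        | nil => exact absurd hs (splitDot_ne_nil rest)
        | cons p ps => simp [consHead]


theorem splitOn_eq_splitDot (cs : List Char) :
    PySem.Chars.splitOn cs ['.'] = splitDot cs := by
  have := go_eq_splitDot (cs.length + 1) cs [] [] (by omega)
  simpa [PySem.Chars.splitOn, consHead] using
    (by
      rw [this]
      cases hs : splitDot cs with
      | nil => exact absurd hs (splitDot_ne_nil cs)
      | cons p ps => simp [consHead] : PySem.Chars.splitOn.go ['.'] (cs.length + 1) cs [] [] = splitDot cs)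

def innerAll (p : List Char) : Bool := p.all (fun ch => PySem.Chars.isalnum ch || ch == '_')

theorem key (cs : List Char) :
    ((splitDot cs).all aCheckPart = bLoop cs true) ∧
    (∀ p ps, splitDot cs = p :: ps → (innerAll p && ps.all aCheckPart) = bLoop cs false) := by
  induction cs with
  | nil =>
    constructor
    · simp [splitDot, aCheckPart, bLoop]
    · intro p ps h
      simp only [splitDot] at h
      cases h
      simp [innerAll, bLoop]
  | cons c rest ih =>
    obtain ⟨ih1, ih2⟩ := ih
    by_cases hc : c = '.'
    · subst hc
      constructor
      · simp [splitDot, aCheckPart, bLoop]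
      · intro p ps h
        simp only [splitDot] at h
        cases h
        simp [innerAll, bLoop, ih1]
    · have hbeq : (c == '.') = false := by simp [hc]
      obtain ⟨p, ps, hs⟩ : ∃ p ps, splitDot rest = p :: ps := by
        cases h : splitDot rest with
        | nil => exact absurd h (splitDot_ne_nil rest)
        | cons p ps => exact ⟨p, ps, rfl⟩
      have hsplit : splitDot (c :: rest) = (c :: p) :: ps := by
        simp [splitDot, if_neg hc, hs]
      constructor
      · rw [hsplit]
        simp only [List.all_cons, bLoop, hbeq, Bool.false_eq_true, if_false]
        by_cases hok : (PySem.Chars.isalpha c || c == '_') = true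
        · rw [if_pos hok]
          have : aCheckPart (c :: p) = innerAll p := by
            simp [aCheckPart, hok, innerAll]
          rw [this, ih2 p ps hs]
          simp
        · rw [if_neg hok]
          have : aCheckPart (c :: p) = false := by
            simp only [aCheckPart]
            rw [if_pos]
            simp only [Bool.not_eq_true] at hok
            simp [hok]
          simp [this]
      · intro q qs hq
        rw [hsplit] at hq
        cases hq
        simp only [bLoop, hbeq, Bool.false_eq_true, if_false]
        by_cases hok : (PySem.Chars.isalnum c || c == '_') = true
        · rw [if_pos hok]
          have : innerAll (c :: p) = innerAll p := by simp [innerAll, hok]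
          rw [this, ih2 p ps hs]
        · rw [if_neg hok]
          have : innerAll (c :: p) = false := by
            simp only [Bool.not_eq_true] at hok
            simp [innerAll, hok]
          simp [this]

-- ===== VERDICT (by name: the statement is the Claim_ definition above) =====
theorem is_safe_identifier_py_spec : Claim_equal_is_safe_identifier_py := by
  intro value _
  unfold Spec_is_safe_identifier_py is_safe_identifier_py is_safe_identifier_py_alt
  rw [splitOn_eq_splitDot]
  rw [if_neg (splitDot_ne_nil value.toList)]
  exact (key value.toList).1
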